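-- pv_equiv track=rewrite | github.com/cjp6ejo3/allmysteven | extract_and_upload.py | _sort_and_group_prizes
-- ===== SOURCE A (Python) =====
-- from collections import defaultdict
--
-- def _sort_and_group_prizes(flat):
--     """同類型放一起，依到期日由近到遠排序。"""
--     groups = defaultdict(list)
--     for p in flat:
--         groups[p["title"]].append(p)
--     # 每組內依到期日排序（無到期日的放最後）
--     FAR = "9999.99.99"
--     for title in groups:
--         groups[title].sort(key=lambda p: p.get("expiry") or FAR)
--     # 各組依「該組最早到期日」排序，到期日近的組排前面
--     def group_min_expiry(items):
--         expiries = [p.get("expiry") for p in items if p.get("expiry")]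
--         return min(expiries) if expiries else FAR
--     sorted_pairs = sorted(groups.items(), key=lambda x: group_min_expiry(x[1]))
--     result = []
--     for title, items in sorted_pairs:
--         result.extend(items)
--     return result
-- ===== SOURCE B (Python) =====
-- def _sort_and_group_prizes(flat):
--     """同類型放一起，依到期日由近到遠排序。(stability-based: three stable sorts instead of group/sort/concat)"""
--     FAR = "9999.99.99"
--     # first-appearance index of each title
--     order = {}
--     for p in flat:
--         order.setdefault(p["title"], len(order))
--     # earliest truthy expiry per title (titles with no truthy expiry stay absent -> FAR)
--     min_exp = {}
--     for p in flat:
--         e = p.get("expiry")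
--         if e:
--             t = p["title"]
--             if t not in min_exp or e < min_exp[t]:
--                 min_exp[t] = e
--     # LSD radix via sort stability: item expiry, then title first-appearance, then group min expiry
--     s = sorted(flat, key=lambda p: p.get("expiry") or FAR)
--     s = sorted(s, key=lambda p: order[p["title"]])
--     s = sorted(s, key=lambda p: min_exp.get(p["title"], FAR))
--     return s
-- ===== Notes on version B (the rewrite author's own statement) =====
-- stated objective: alternative
-- what changed: B replaces A's defaultdict grouping, per-group sorts, sort of the groups by min expiry and concatenation with three stable sorts of the flat list (LSD radix via sort stability: item expiry-or-FAR, then title first-appearance index, then per-title min truthy expiry), the two per-title tables being built in two simple passes.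
import Mathlib
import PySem

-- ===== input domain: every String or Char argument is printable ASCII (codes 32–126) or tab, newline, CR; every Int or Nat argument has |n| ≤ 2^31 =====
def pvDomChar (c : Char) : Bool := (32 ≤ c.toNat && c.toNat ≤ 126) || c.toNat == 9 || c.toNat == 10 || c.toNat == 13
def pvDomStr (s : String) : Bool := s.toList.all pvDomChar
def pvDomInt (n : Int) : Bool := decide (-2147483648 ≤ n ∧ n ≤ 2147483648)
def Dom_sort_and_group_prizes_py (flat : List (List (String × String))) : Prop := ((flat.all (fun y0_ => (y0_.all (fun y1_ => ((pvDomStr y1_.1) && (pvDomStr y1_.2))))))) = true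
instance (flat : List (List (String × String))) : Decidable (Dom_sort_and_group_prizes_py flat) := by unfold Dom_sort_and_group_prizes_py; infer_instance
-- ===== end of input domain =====

-- B replaces A's group-by-title / per-group sort / group sort / concatenation with three stable
-- sorts of the flat list (LSD-radix via sort stability) over precomputed per-title tables;
-- objective: an alternative algorithm of similar cost, proved to return the same list.

-- ===== PORT A =====
-- shared small helpers: both Pythons contain the same subexpressions
-- p["title"] (under Pre_, the key is present, so getD's default is never used),
-- p.get("expiry"), Python truthiness of an Optional[str], and the key `p.get("expiry") or FAR`.
def pvFAR : String := "9999.99.99"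
def pvTitle (p : List (String × String)) : String := (PySem.Dict.mk p).getD "title" ""
def pvExpiry? (p : List (String × String)) : Option String := (PySem.Dict.mk p).get? "expiry"
def pvTruthy (o : Option String) : Bool := match o with | none => false | some s => !(s == "")
def pvItemKey (p : List (String × String)) : String :=
  if pvTruthy (pvExpiry? p) then (pvExpiry? p).getD "" else pvFAR
def pvGroupMin (items : List (List (String × String))) : String :=
  let expiries := (items.filter (fun p => pvTruthy (pvExpiry? p))).map (fun p => (pvExpiry? p).getD "")
  (PySem.List.min? expiries (fun s => s)).getD pvFAR

def sort_and_group_prizes_py (flat : List (List (String × String))) : List (List (String × String)) :=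
  let groups := flat.foldl (fun d p => d.modify (pvTitle p) [] (fun l => l ++ [p])) PySem.Dict.empty
  let pairs := groups.items.map (fun x => (x.1, PySem.List.sorted x.2 pvItemKey))
  let sorted_pairs := PySem.List.sorted pairs (fun x => pvGroupMin x.2)
  sorted_pairs.foldl (fun acc x => acc ++ x.2) []

def sort_and_group_prizes_py_alt (flat : List (List (String × String))) : List (List (String × String)) :=
  let order := flat.foldl (fun d p => d.setdefault (pvTitle p) (Int.ofNat d.size)) PySem.Dict.empty
  let minExp := flat.foldl (fun d p =>
      if pvTruthy (pvExpiry? p) then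
        let e := (pvExpiry? p).getD ""
        let t := pvTitle p
        if d.contains t = false ∨ e < d.getD t "" then d.insert t e else d
      else d) PySem.Dict.empty
  let s1 := PySem.List.sorted flat pvItemKey
  let s2 := PySem.List.sorted s1 (fun p => order.getD (pvTitle p) 0)
  PySem.List.sorted s2 (fun p => minExp.getD (pvTitle p) pvFAR)


-- ===== PRECONDITION & SPEC =====
-- Pre_ excludes exactly the inputs where some prize dict has no "title" key: there Python A
-- raises KeyError (and Python B does too).
def Pre_sort_and_group_prizes_py (flat : List (List (String × String))) : Prop :=
  (flat.all (fun p => (PySem.Dict.mk p).contains "title")) = true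
instance (flat : List (List (String × String))) : Decidable (Pre_sort_and_group_prizes_py flat) := by
  unfold Pre_sort_and_group_prizes_py; infer_instance
def pvWitness_sort_and_group_prizes_py : (List (List (String × String))) :=
  [[("title", "a"), ("expiry", "2024.01.02")], [("title", "b")], [("title", "a")]]
def Spec_sort_and_group_prizes_py (flat : List (List (String × String))) (out : List (List (String × String))) : Prop := out = sort_and_group_prizes_py_alt flat
instance (flat : List (List (String × String))) (out : List (List (String × String))) : Decidable (Spec_sort_and_group_prizes_py flat out) := by unfold Spec_sort_and_group_prizes_py; infer_instance

-- ===== CLAIM (what is proved, stated in full; the proofs are below) =====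
def Claim_equal_sort_and_group_prizes_py : Prop := ∀ (flat : List (List (String × String))), Dom_sort_and_group_prizes_py flat → Pre_sort_and_group_prizes_py flat → Spec_sort_and_group_prizes_py flat (sort_and_group_prizes_py flat)

-- ===== LEMMAS AND PROOFS =====

-- insertBy places x before the first y with before x y
theorem pv_insertBy_of_forall_before {α : Type} (before : α → α → Bool) (x : α) (l : List α)
    (h : ∀ z ∈ l, before x z = true) : PySem.List.insertBy before x l = x :: l := by
  cases l with
  | nil => rfl
  | cons y ys => simp [PySem.List.insertBy, h y (by simp)]

theorem pv_insertBy_congr {α : Type} (b1 b2 : α → α → Bool) (x : α) (l : List α)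
    (h : ∀ y ∈ l, b1 x y = b2 x y) : PySem.List.insertBy b1 x l = PySem.List.insertBy b2 x l := by
  induction l with
  | nil => rfl
  | cons y ys ih =>
      simp only [PySem.List.insertBy, h y (by simp)]
      rcases Bool.eq_false_or_eq_true (b2 x y) with hb | hb <;>
        simp [hb, ih (fun z hz => h z (by simp [hz]))]

theorem pv_sorted_append_singleton {α κ : Type} [LinearOrder κ] (xs : List α) (x : α) (key : α → κ) :
    PySem.List.sorted (xs ++ [x]) key =
      PySem.List.insertBy (fun a b => decide (key a < key b)) x (PySem.List.sorted xs key) := by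
  rw [PySem.List.sorted_eq_foldl_insertBy, PySem.List.sorted_eq_foldl_insertBy, List.foldl_append]
  rfl

theorem pv_sorted_key_congr {α κ : Type} [LinearOrder κ] (xs : List α) (k1 k2 : α → κ)
    (h : ∀ x ∈ xs, k1 x = k2 x) : PySem.List.sorted xs k1 = PySem.List.sorted xs k2 := by
  induction xs using List.reverseRecOn with
  | nil => rfl
  | append_singleton xs x ih =>
      rw [pv_sorted_append_singleton, pv_sorted_append_singleton,
        ih (fun y hy => h y (by simp [hy]))]
      apply pv_insertBy_congr
      intro y hy
      rw [PySem.List.mem_sorted] at hy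
      rw [h x (by simp), h y (by simp [hy])]

theorem pv_filter_insertBy {α κ : Type} [LinearOrder κ] (key : α → κ) (p : α → Bool) (x : α) (l : List α)
    (hl : l.Pairwise (fun a b => key a ≤ key b)) :
    (PySem.List.insertBy (fun a b => decide (key a < key b)) x l).filter p =
      if p x then PySem.List.insertBy (fun a b => decide (key a < key b)) x (l.filter p)
      else l.filter p := by
  induction l with
  | nil =>
      have h0 : PySem.List.insertBy (fun a b => decide (key a < key b)) x ([] : List α) = [x] := rfl
      rw [h0]
      rcases Bool.eq_false_or_eq_true (p x) with hp | hp <;> simp [List.filter, hp, h0]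
  | cons y ys ih =>
      rcases List.pairwise_cons.mp hl with ⟨hy, hys⟩
      by_cases hxy : key x < key y
      · have hstep : PySem.List.insertBy (fun a b => decide (key a < key b)) x (y :: ys) = x :: y :: ys := by
          simp [PySem.List.insertBy, hxy]
        have hall : ∀ z ∈ (y :: ys).filter p, (fun a b => decide (key a < key b)) x z = true := by
          intro z hz
          have hz' := List.mem_of_mem_filter hz
          rcases List.mem_cons.mp hz' with rfl | hz''
          · simpa using hxy
          · simpa using lt_of_lt_of_le hxy (hy z hz'')
        rw [hstep, pv_insertBy_of_forall_before _ _ _ hall]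
        rcases Bool.eq_false_or_eq_true (p x) with hp | hp <;> simp [List.filter_cons, hp]
      · have hstep : PySem.List.insertBy (fun a b => decide (key a < key b)) x (y :: ys) =
            y :: PySem.List.insertBy (fun a b => decide (key a < key b)) x ys := by
          simp [PySem.List.insertBy, hxy]
        rw [hstep]
        have hstep2 : ∀ t : List _, PySem.List.insertBy (fun a b => decide (key a < key b)) x (y :: t) =
            y :: PySem.List.insertBy (fun a b => decide (key a < key b)) x t := by
          intro t; simp [PySem.List.insertBy, hxy]
        rcases Bool.eq_false_or_eq_true (p x) with hp | hp <;>
          rcases Bool.eq_false_or_eq_true (p y) with hpy | hpy <;>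
            simp [hpy, hp, ih hys, hstep2]

theorem pv_filter_sorted {α κ : Type} [LinearOrder κ] (xs : List α) (key : α → κ) (p : α → Bool) :
    (PySem.List.sorted xs key).filter p = PySem.List.sorted (xs.filter p) key := by
  induction xs using List.reverseRecOn with
  | nil => rfl
  | append_singleton xs x ih =>
      rw [pv_sorted_append_singleton,
        pv_filter_insertBy key p x _ (PySem.List.sorted_pairwise xs key), ih, List.filter_append]
      rcases Bool.eq_false_or_eq_true (p x) with hp | hp
      · rw [if_pos hp]
        have hfx : List.filter p [x] = [x] := by simp [hp]
        rw [hfx, pv_sorted_append_singleton]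
      · rw [if_neg (by simp [hp])]
        have hfx : List.filter p [x] = [] := by simp [hp]
        rw [hfx, List.append_nil]

theorem pv_split_filter {α κ : Type} [LinearOrder κ] [DecidableEq κ] (key : α → κ) (v : κ) (l : List α)
    (hl : l.Pairwise (fun a b => key a ≤ key b)) (hmin : ∀ x ∈ l, key x = v ∨ v < key x) :
    l.filter (fun x => decide (key x = v)) ++ l.filter (fun x => !decide (key x = v)) = l := by
  induction l with
  | nil => rfl
  | cons a t ih =>
      rcases List.pairwise_cons.mp hl with ⟨ha, ht⟩
      by_cases hav : key a = v
      · have ihh := ih ht (fun x hx => hmin x (by simp [hx]))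
        simp [hav, ihh]
      · have hv : v < key a := by rcases hmin a (by simp) with h | h; exact absurd h hav; exact h
        have h1 : t.filter (fun x => decide (key x = v)) = [] := by
          apply List.filter_eq_nil_iff.mpr
          intro x hx
          simp only [decide_eq_true_eq]
          exact ne_of_gt (lt_of_lt_of_le hv (ha x hx))
        have h2 : t.filter (fun x => !decide (key x = v)) = t := by
          apply List.filter_eq_self.mpr
          intro x hx
          simp only [Bool.not_eq_eq_eq_not, Bool.not_true, decide_eq_false_iff_not]
          exact ne_of_gt (lt_of_lt_of_le hv (ha x hx))
        simp [hav, h1, h2]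

theorem pv_partition_core {α κ : Type} [LinearOrder κ] [DecidableEq κ] (key : α → κ) :
    ∀ (vs : List κ) (l : List α), l.Pairwise (fun a b => key a ≤ key b) →
      vs.Pairwise (· < ·) → (∀ x ∈ l, key x ∈ vs) →
      vs.flatMap (fun v => l.filter (fun x => decide (key x = v))) = l := by
  intro vs
  induction vs with
  | nil =>
      intro l _ _ hcov
      cases l with
      | nil => rfl
      | cons a t => exact absurd (hcov a (by simp)) (by simp)
  | cons v vs' ih =>
      intro l hl hvs hcov
      rcases List.pairwise_cons.mp hvs with ⟨hv, hvs'⟩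
      have hmin : ∀ x ∈ l, key x = v ∨ v < key x := by
        intro x hx
        rcases List.mem_cons.mp (hcov x hx) with h | h
        · exact Or.inl h
        · exact Or.inr (hv _ h)
      set l2 := l.filter (fun x => !decide (key x = v)) with hl2
      have hl2p : l2.Pairwise (fun a b => key a ≤ key b) :=
        List.Pairwise.sublist List.filter_sublist hl
      have hcov2 : ∀ x ∈ l2, key x ∈ vs' := by
        intro x hx
        rcases List.mem_filter.mp hx with ⟨hxl, hxv⟩
        rcases List.mem_cons.mp (hcov x hxl) with h | h
        · exact absurd h (by simpa using hxv)
        · exact h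
      have hsame : ∀ w ∈ vs', l.filter (fun x => decide (key x = w)) = l2.filter (fun x => decide (key x = w)) := by
        intro w hw
        rw [hl2, List.filter_filter]
        apply (List.filter_congr _).symm
        intro x hx
        by_cases hxw : key x = w
        · simp only [hxw, decide_true, Bool.true_and]
          simp [(hv _ hw).ne']
        · simp [hxw]
      rw [List.flatMap_cons]
      have hmap : vs'.flatMap (fun w => l.filter (fun x => decide (key x = w))) =
          vs'.flatMap (fun w => l2.filter (fun x => decide (key x = w))) := by
        simp only [List.flatMap_def]
        exact congrArg List.flatten (List.map_congr_left hsame)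
      rw [hmap, ih l2 hl2p hvs' hcov2]
      exact pv_split_filter key v l hl hmin

-- ===== supporting definitions for the proofs =====
def pvTruthyExps (l : List (List (String × String))) : List String :=
  (l.filter (fun p => pvTruthy (pvExpiry? p))).map (fun p => (pvExpiry? p).getD "")
def pvGrp (flat : List (List (String × String))) (t : String) : List (List (String × String)) :=
  flat.filter (fun p => decide (pvTitle p = t))
def pvT (flat : List (List (String × String))) : List String := PySem.List.dedup (flat.map pvTitle)
def pvM (flat : List (List (String × String))) (t : String) : String :=
  (PySem.List.min? (pvTruthyExps (pvGrp flat t)) (fun s => s)).getD pvFAR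
def pvIdx (flat : List (List (String × String))) (t : String) : Int := ((pvT flat).idxOf t : Int)
def pvVS (flat : List (List (String × String))) : List String :=
  PySem.List.sorted (PySem.List.dedup ((pvT flat).map (pvM flat))) (fun v => v)
def pvC (flat : List (List (String × String))) : List (List (String × String)) :=
  (pvVS flat).flatMap (fun v => ((pvT flat).filter (fun t => decide (pvM flat t = v))).flatMap
    (fun t => PySem.List.sorted (pvGrp flat t) pvItemKey))

theorem pv_sorted_partition' {α κ : Type} [LinearOrder κ] [DecidableEq κ]
    (xs : List α) (key : α → κ) (vs : List κ)
    (hvs : vs.Pairwise (· < ·)) (hcov : ∀ x ∈ xs, key x ∈ vs) :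
    PySem.List.sorted xs key = vs.flatMap (fun v => xs.filter (fun x => decide (key x = v))) := by
  have h1 := pv_partition_core key vs (PySem.List.sorted xs key)
    (PySem.List.sorted_pairwise xs key) hvs
    (by intro x hx; exact hcov x ((PySem.List.mem_sorted xs key false x).mp hx))
  conv_lhs => rw [← h1]
  simp only [List.flatMap_def]
  apply congrArg List.flatten
  apply List.map_congr_left
  intro v _
  rw [pv_filter_sorted]
  apply PySem.List.sorted_eq_self_of_pairwise
  have hall : ∀ a ∈ xs.filter (fun x => decide (key x = v)), key a = v := by
    intro a hax; exact of_decide_eq_true (List.mem_filter.mp hax).2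
  apply List.pairwise_of_forall_mem_list
  intro a ha b hb
  rw [hall a ha, hall b hb]

theorem pv_min?_append_singleton {α κ : Type} [LT κ] [DecidableLT κ] (l : List α) (e : α) (key : α → κ) :
    PySem.List.min? (l ++ [e]) key =
      match PySem.List.min? l key with
      | none => some e
      | some m => if key e < key m then some e else some m := by
  have hstep : PySem.List.min? (l ++ [e]) key =
      List.foldl (fun acc x => match acc with
        | none => some x
        | some m => if key x < key m then some x else some m) (PySem.List.min? l key) [e] := by
    unfold PySem.List.min?
    exact List.foldl_append
  rw [hstep]
  rcases h : PySem.List.min? l key with _ | m <;> rfl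

theorem pv_min?_getD_perm {κ : Type} [LinearOrder κ] (l l' : List κ) (d : κ) (hp : l.Perm l') :
    (PySem.List.min? l (fun s => s)).getD d = (PySem.List.min? l' (fun s => s)).getD d := by
  rcases h1 : PySem.List.min? l (fun s => s) with _ | m
  · have : l = [] := (PySem.List.min?_eq_none_iff l _).mp h1
    subst this
    have h2 : l' = [] := hp.symm.eq_nil
    subst h2
    rfl
  · rcases h2 : PySem.List.min? l' (fun s => s) with _ | m'
    · have : l' = [] := (PySem.List.min?_eq_none_iff l' _).mp h2
      subst this
      have : l = [] := hp.eq_nil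
      subst this
      simp [PySem.List.min?] at h1
    · have hm : m ∈ l := PySem.List.min?_mem h1
      have hm' : m' ∈ l' := PySem.List.min?_mem h2
      have h3 : m ≤ m' := PySem.List.min?_isMin h1 m' (hp.mem_iff.mpr hm')
      have h4 : m' ≤ m := PySem.List.min?_isMin h2 m (hp.mem_iff.mp hm)
      simp [le_antisymm h3 h4]

theorem pv_idxOf_pairwise {α : Type} [BEq α] [LawfulBEq α] (l : List α) (h : l.Nodup) :
    l.Pairwise (fun a b => l.idxOf a < l.idxOf b) := by
  induction l with
  | nil => exact List.Pairwise.nil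
  | cons a t ih =>
      rcases List.nodup_cons.mp h with ⟨ha, ht⟩
      apply List.pairwise_cons.mpr
      constructor
      · intro b hb
        have hba : b ≠ a := fun hh => ha (hh ▸ hb)
        rw [List.idxOf_cons_self, List.idxOf_cons_ne t (Ne.symm hba)]
        exact Nat.succ_pos _
      · apply (ih ht).imp_of_mem
        intro x y hx hy hxy
        have hxa : x ≠ a := fun hh => ha (hh ▸ hx)
        have hya : y ≠ a := fun hh => ha (hh ▸ hy)
        rw [List.idxOf_cons_ne t (Ne.symm hxa), List.idxOf_cons_ne t (Ne.symm hya)]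
        exact Nat.succ_lt_succ hxy

theorem pv_flatMap_if {α β : Type} (l : List α) (p : α → Bool) (g : α → List β) :
    l.flatMap (fun x => if p x then g x else []) = (l.filter p).flatMap g := by
  induction l with
  | nil => rfl
  | cons a t ih =>
      rcases Bool.eq_false_or_eq_true (p a) with hp | hp <;>
        simp [List.flatMap_cons, hp, ih]

theorem pv_filter_all_eq {α : Type} (l : List α) (p : α → Bool) (c : Bool)
    (h : ∀ x ∈ l, p x = c) : l.filter p = if c then l else [] := by
  rcases Bool.eq_false_or_eq_true c with hc | hc
  · subst hc
    simp only [if_true]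
    exact List.filter_eq_self.mpr h
  · subst hc
    simp only [Bool.false_eq_true, if_false]
    exact List.filter_eq_nil_iff.mpr (fun x hx => by simp [h x hx])

theorem pv_mem_title (flat : List (List (String × String))) (p : List (String × String))
    (hp : p ∈ flat) : pvTitle p ∈ pvT flat := by
  rw [pvT, PySem.List.mem_dedup]
  exact List.mem_map_of_mem hp

theorem pv_groups_items (flat : List (List (String × String))) :
    (flat.foldl (fun d p => d.modify (pvTitle p) [] (fun l => l ++ [p])) PySem.Dict.empty).items
      = (pvT flat).map (fun t => (t, pvGrp flat t)) := by
  set D := flat.foldl (fun d p => d.modify (pvTitle p) [] (fun l => l ++ [p])) PySem.Dict.empty with hD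
  have hnd : D.keys.Nodup := by
    rw [hD]
    exact PySem.Dict.nodup_keys_foldl_modify_key flat pvTitle [] (fun _ p l => l ++ [p])
      PySem.Dict.empty (by simp [PySem.Dict.keys_empty])
  have hkeys : D.keys = pvT flat := by
    rw [hD, PySem.Dict.keys_foldl_modify_key flat pvTitle [] (fun _ p l => l ++ [p]) PySem.Dict.empty,
      PySem.Dict.keys_empty, pvT, PySem.List.dedup_eq_ofList, PySem.Set.ofList_eq_foldl]
    rfl
  have hget : ∀ t, D.getD t [] = pvGrp flat t := by
    intro t
    have hmap : D = (flat.map (fun p => (pvTitle p, p))).foldl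
        (fun d q => d.modify q.1 [] (fun l => l ++ [q.2])) PySem.Dict.empty := by
      rw [hD, List.foldl_map]
    rw [hmap, PySem.Dict.getD_foldl_modify_append, PySem.Dict.getD_empty, List.nil_append,
      List.filter_map, List.map_map, pvGrp]
    have hf : flat.filter ((fun (q : String × List (String × String)) => q.1 == t) ∘
        (fun p => (pvTitle p, p))) = flat.filter (fun p => decide (pvTitle p = t)) := by
      apply List.filter_congr
      intro x _
      by_cases h : pvTitle x = t <;> simp [h]
    rw [hf]
    have : ((fun (x : String × List (String × String)) => x.2) ∘ (fun p => (pvTitle p, p)))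
        = fun p => p := rfl
    rw [this]
    exact List.map_id' _
  rw [PySem.Dict.items_eq_map_keys D hnd [], hkeys]
  apply List.map_congr_left
  intro t _
  rw [hget]

theorem pv_order_items (flat : List (List (String × String))) :
    (flat.foldl (fun d p => d.setdefault (pvTitle p) (Int.ofNat d.size)) PySem.Dict.empty).items
      = (PySem.List.enumerate (pvT flat) 0).map (fun q => (q.2, q.1)) := by
  induction flat using List.reverseRecOn with
  | nil => rfl
  | append_singleton fl p ih =>
      set D := fl.foldl (fun d p => d.setdefault (pvTitle p) (Int.ofNat d.size)) PySem.Dict.empty with hD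
      have hfold : (fl ++ [p]).foldl (fun d p => d.setdefault (pvTitle p) (Int.ofNat d.size)) PySem.Dict.empty
          = D.setdefault (pvTitle p) (Int.ofNat D.size) := by
        rw [List.foldl_append]
        rfl
      have hkeys : D.keys = pvT fl := by
        show D.items.map (·.1) = pvT fl
        rw [ih, List.map_map]
        exact PySem.List.map_snd_enumerate (pvT fl) 0
      have hT : pvT (fl ++ [p]) = PySem.Set.add (pvT fl) (pvTitle p) := by
        rw [pvT, pvT, List.map_append, PySem.List.dedup_eq_ofList, PySem.List.dedup_eq_ofList,
          PySem.Set.ofList_eq_foldl, PySem.Set.ofList_eq_foldl, List.foldl_append]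
        rfl
      rw [hfold]
      by_cases hmem : pvTitle p ∈ pvT fl
      · have hcont : D.contains (pvTitle p) = true := by
          rw [PySem.Dict.contains_eq_decide_mem_keys, hkeys]
          simp [hmem]
        have hcont' : PySem.Set.contains (pvT fl) (pvTitle p) = true := by
          simp [PySem.Set.contains]
          exact hmem
        rw [PySem.Dict.setdefault, if_pos hcont, hT, PySem.Set.add, if_pos hcont']
        exact ih
      · have hcont : D.contains (pvTitle p) = false := by
          rw [PySem.Dict.contains_eq_decide_mem_keys, hkeys]
          simp [hmem]
        have hcont' : PySem.Set.contains (pvT fl) (pvTitle p) = false := by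
          simp [PySem.Set.contains]
          exact hmem
        have hlen : D.size = (pvT fl).length := by
          show D.items.length = _
          rw [ih, List.length_map, PySem.List.length_enumerate]
        rw [PySem.Dict.setdefault, if_neg (by simp [hcont]), hT, PySem.Set.add,
          if_neg (by rw [hcont']; exact Bool.false_ne_true)]
        show D.items ++ [(pvTitle p, Int.ofNat D.size)] = _
        rw [ih, PySem.List.enumerate_append]
        simp [hlen]

theorem pv_korder (flat : List (List (String × String))) (t : String) (ht : t ∈ pvT flat) :
    (flat.foldl (fun d p => d.setdefault (pvTitle p) (Int.ofNat d.size)) PySem.Dict.empty).getD t 0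
      = pvIdx flat t := by
  set D := flat.foldl (fun d p => d.setdefault (pvTitle p) (Int.ofNat d.size)) PySem.Dict.empty with hD
  have hkeys : D.keys = pvT flat := by
    show D.items.map (·.1) = pvT flat
    rw [hD, pv_order_items, List.map_map]
    exact PySem.List.map_snd_enumerate (pvT flat) 0
  have hnd : D.keys.Nodup := by
    rw [hkeys]
    exact PySem.List.nodup_dedup _
  have hitem : (t, pvIdx flat t) ∈ D.items := by
    rw [hD, pv_order_items]
    apply List.mem_map.mpr
    refine ⟨((pvIdx flat t), t), ?_, rfl⟩
    rw [PySem.List.mem_enumerate_iff]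
    refine ⟨(pvT flat).idxOf t, List.idxOf_lt_length_of_mem ht, ?_⟩
    rw [List.getElem_idxOf]
    simp [pvIdx]
  exact PySem.Dict.getD_of_mem_items D hitem hnd 0

theorem pv_minD_get? (flat : List (List (String × String))) (t : String) :
    (flat.foldl (fun d p =>
      if pvTruthy (pvExpiry? p) then
        let e := (pvExpiry? p).getD ""
        let t := pvTitle p
        if d.contains t = false ∨ e < d.getD t "" then d.insert t e else d
      else d) PySem.Dict.empty).get? t
      = PySem.List.min? (pvTruthyExps (pvGrp flat t)) (fun s => s) := by
  induction flat using List.reverseRecOn with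
  | nil => simp [pvGrp, pvTruthyExps, PySem.List.min?, PySem.Dict.get?_empty]
  | append_singleton fl p ih =>
      rw [List.foldl_append]
      set D := fl.foldl (fun d p =>
        if pvTruthy (pvExpiry? p) then
          let e := (pvExpiry? p).getD ""
          let t := pvTitle p
          if d.contains t = false ∨ e < d.getD t "" then d.insert t e else d
        else d) PySem.Dict.empty with hDdef
      have hgrp : pvGrp (fl ++ [p]) t = pvGrp fl t ++ List.filter (fun p => decide (pvTitle p = t)) [p] := by
        rw [pvGrp, pvGrp, List.filter_append]
      have hTE : ∀ (a b : List (List (String × String))), pvTruthyExps (a ++ b) = pvTruthyExps a ++ pvTruthyExps b := by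
        intro a b
        rw [pvTruthyExps, pvTruthyExps, pvTruthyExps, List.filter_append, List.map_append]
      rcases Bool.eq_false_or_eq_true (pvTruthy (pvExpiry? p)) with htr | htr
      · -- truthy case
        simp only [List.foldl_cons, List.foldl_nil, htr, if_true]
        by_cases hteq : pvTitle p = t
        · have hfil : List.filter (fun q => decide (pvTitle q = t)) [p] = [p] := by
            simp [List.filter, hteq]
          have hTE1 : pvTruthyExps [p] = [(pvExpiry? p).getD ""] := by
            simp [pvTruthyExps, List.filter, htr]
          rw [hgrp, hfil, hTE, hTE1, pv_min?_append_singleton, ← ih]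
          rcases hm : D.get? t with _ | m
          · have hcont : D.contains (pvTitle p) = false := by
              rw [PySem.Dict.contains_eq_isSome_get?, hteq, hm]
              rfl
            rw [if_pos (Or.inl hcont), hteq, PySem.Dict.get?_insert_self]
          · have hcont : D.contains (pvTitle p) = true := by
              rw [PySem.Dict.contains_eq_isSome_get?, hteq, hm]
              rfl
            have hgd : D.getD (pvTitle p) "" = m := by
              rw [hteq]
              exact PySem.Dict.getD_of_get?_eq_some D "" hm
            show _ = if (pvExpiry? p).getD "" < m then some ((pvExpiry? p).getD "") else some m
            by_cases hlt : (pvExpiry? p).getD "" < m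
            · rw [if_pos hlt, if_pos (Or.inr (by rw [hgd]; exact hlt)), hteq,
                PySem.Dict.get?_insert_self]
            · rw [if_neg hlt, if_neg (by rw [hgd, hcont]; simp [hlt]), hm]
        · have hfil : List.filter (fun q => decide (pvTitle q = t)) [p] = [] := by
            simp [List.filter, hteq]
          rw [hgrp, hfil, List.append_nil, ← ih]
          by_cases hc : D.contains (pvTitle p) = false ∨ (pvExpiry? p).getD "" < D.getD (pvTitle p) ""
          · rw [if_pos hc]
            exact PySem.Dict.get?_insert_of_ne D ((pvExpiry? p).getD "") (fun hh => hteq hh.symm)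
          · rw [if_neg hc]
      · -- not truthy
        simp only [List.foldl_cons, List.foldl_nil, htr]
        rw [if_neg (by simp [htr])]
        rw [ih, hgrp, hTE]
        have : pvTruthyExps (List.filter (fun p => decide (pvTitle p = t)) [p]) = [] := by
          rcases Bool.eq_false_or_eq_true (decide (pvTitle p = t)) with h | h <;>
            simp [pvTruthyExps, List.filter, h, htr]
        rw [this, List.append_nil]

theorem pv_VS_pairwise (flat : List (List (String × String))) :
    (pvVS flat).Pairwise (· < ·) := by
  rw [pvVS, PySem.List.dedup_eq_ofList]
  exact PySem.List.sorted_ofList_pairwise_lt ((pvT flat).map (pvM flat))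

theorem pv_mem_VS (flat : List (List (String × String))) (t : String) (ht : t ∈ pvT flat) :
    pvM flat t ∈ pvVS flat := by
  rw [pvVS, PySem.List.mem_sorted, PySem.List.mem_dedup]
  exact List.mem_map_of_mem ht

theorem pv_A_eq (flat : List (List (String × String))) :
    sort_and_group_prizes_py flat = pvC flat := by
  have h0 : sort_and_group_prizes_py flat =
      (PySem.List.sorted (((flat.foldl (fun d p => d.modify (pvTitle p) [] (fun l => l ++ [p]))
          PySem.Dict.empty).items).map (fun x => (x.1, PySem.List.sorted x.2 pvItemKey)))
        (fun x => pvGroupMin x.2)).foldl (fun acc x => acc ++ x.2) [] := rfl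
  rw [h0, pv_groups_items, List.map_map]
  have hcomp : ((fun (x : String × List (List (String × String))) =>
      (x.1, PySem.List.sorted x.2 pvItemKey)) ∘ (fun t => (t, pvGrp flat t)))
      = fun t => (t, PySem.List.sorted (pvGrp flat t) pvItemKey) := rfl
  rw [hcomp]
  set pairs := (pvT flat).map (fun t => (t, PySem.List.sorted (pvGrp flat t) pvItemKey)) with hpairs
  have hfm := PySem.List.foldl_append_eq_flatMap
    (fun (x : String × List (List (String × String))) => x.2)
    (PySem.List.sorted pairs (fun x => pvGroupMin x.2)) []
  rw [hfm, List.nil_append]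
  have hkey : PySem.List.sorted pairs (fun x => pvGroupMin x.2)
      = PySem.List.sorted pairs (fun x => pvM flat x.1) := by
    apply pv_sorted_key_congr
    intro x hx
    rw [hpairs] at hx
    rcases List.mem_map.mp hx with ⟨t, _, rfl⟩
    show pvGroupMin (PySem.List.sorted (pvGrp flat t) pvItemKey) = pvM flat t
    have hperm := PySem.List.sorted_perm (pvGrp flat t) pvItemKey false
    rw [pvM]
    show (PySem.List.min? (pvTruthyExps (PySem.List.sorted (pvGrp flat t) pvItemKey))
      (fun s => s)).getD pvFAR = _
    apply pv_min?_getD_perm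
    exact (hperm.filter _).map _
  rw [hkey]
  rw [pv_sorted_partition' pairs (fun x => pvM flat x.1) (pvVS flat) (pv_VS_pairwise flat) ?hcov]
  case hcov =>
    intro x hx
    rw [hpairs] at hx
    rcases List.mem_map.mp hx with ⟨t, ht, rfl⟩
    exact pv_mem_VS flat t ht
  rw [List.flatMap_assoc]
  rw [pvC]
  simp only [List.flatMap_def]
  apply congrArg List.flatten
  apply List.map_congr_left
  intro v _
  rw [hpairs, List.filter_map, List.map_map]
  rfl

theorem pv_B2 (flat : List (List (String × String))) :
    PySem.List.sorted (PySem.List.sorted flat pvItemKey)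
      (fun p => (flat.foldl (fun d p => d.setdefault (pvTitle p) (Int.ofNat d.size))
        PySem.Dict.empty).getD (pvTitle p) 0)
    = (pvT flat).flatMap (fun t => PySem.List.sorted (pvGrp flat t) pvItemKey) := by
  set B3 := PySem.List.sorted flat pvItemKey with hB3
  have hmemB3 : ∀ p ∈ B3, p ∈ flat := by
    intro p hp
    rw [hB3, PySem.List.mem_sorted] at hp
    exact hp
  have hkc : PySem.List.sorted B3
      (fun p => (flat.foldl (fun d p => d.setdefault (pvTitle p) (Int.ofNat d.size))
        PySem.Dict.empty).getD (pvTitle p) 0)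
      = PySem.List.sorted B3 (fun p => pvIdx flat (pvTitle p)) := by
    apply pv_sorted_key_congr
    intro p hp
    exact pv_korder flat (pvTitle p) (pv_mem_title flat p (hmemB3 p hp))
  rw [hkc]
  have hvs : ((pvT flat).map (pvIdx flat)).Pairwise (· < ·) := by
    rw [List.pairwise_map]
    apply (pv_idxOf_pairwise (pvT flat) (PySem.List.nodup_dedup _)).imp
    intro a b h
    simp only [pvIdx]
    exact_mod_cast h
  have hcov : ∀ p ∈ B3, pvIdx flat (pvTitle p) ∈ (pvT flat).map (pvIdx flat) := by
    intro p hp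
    exact List.mem_map_of_mem (pv_mem_title flat p (hmemB3 p hp))
  rw [pv_sorted_partition' B3 _ _ hvs hcov, List.flatMap_map]
  simp only [List.flatMap_def]
  apply congrArg List.flatten
  apply List.map_congr_left
  intro t ht
  have hfc : B3.filter (fun p => decide (pvIdx flat (pvTitle p) = pvIdx flat t))
      = B3.filter (fun p => decide (pvTitle p = t)) := by
    apply List.filter_congr
    intro p hp
    have h1 : pvTitle p ∈ pvT flat := pv_mem_title flat p (hmemB3 p hp)
    have hiff : (pvIdx flat (pvTitle p) = pvIdx flat t) ↔ (pvTitle p = t) := by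
      rw [pvIdx, pvIdx, Nat.cast_inj]
      exact List.idxOf_inj h1
    exact decide_eq_decide.mpr hiff
  rw [hfc, hB3, pv_filter_sorted]
  rfl

theorem pv_B_eq (flat : List (List (String × String))) :
    sort_and_group_prizes_py_alt flat = pvC flat := by
  have h0 : sort_and_group_prizes_py_alt flat =
      PySem.List.sorted
        (PySem.List.sorted (PySem.List.sorted flat pvItemKey)
          (fun p => (flat.foldl (fun d p => d.setdefault (pvTitle p) (Int.ofNat d.size))
            PySem.Dict.empty).getD (pvTitle p) 0))
        (fun p => (flat.foldl (fun d p =>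
            if pvTruthy (pvExpiry? p) then
              let e := (pvExpiry? p).getD ""
              let t := pvTitle p
              if d.contains t = false ∨ e < d.getD t "" then d.insert t e else d
            else d) PySem.Dict.empty).getD (pvTitle p) pvFAR) := rfl
  have hkm : (fun p => (flat.foldl (fun d p =>
        if pvTruthy (pvExpiry? p) then
          let e := (pvExpiry? p).getD ""
          let t := pvTitle p
          if d.contains t = false ∨ e < d.getD t "" then d.insert t e else d
        else d) PySem.Dict.empty).getD (pvTitle p) pvFAR)
      = (fun p : List (String × String) => pvM flat (pvTitle p)) := by
    funext p
    rw [PySem.Dict.getD_eq_get?_getD, pv_minD_get?]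
    rfl
  rw [h0, hkm]
  have hcov : ∀ p ∈ PySem.List.sorted (PySem.List.sorted flat pvItemKey)
      (fun p => (flat.foldl (fun d p => d.setdefault (pvTitle p) (Int.ofNat d.size))
        PySem.Dict.empty).getD (pvTitle p) 0),
      pvM flat (pvTitle p) ∈ pvVS flat := by
    intro p hp
    rw [PySem.List.mem_sorted, PySem.List.mem_sorted] at hp
    exact pv_mem_VS flat (pvTitle p) (pv_mem_title flat p hp)
  rw [pv_sorted_partition' _ _ (pvVS flat) (pv_VS_pairwise flat) hcov]
  rw [pv_B2, pvC]
  have hinner : ∀ v, (List.flatMap (fun t => PySem.List.sorted (pvGrp flat t) pvItemKey)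
      (pvT flat)).filter (fun x => decide (pvM flat (pvTitle x) = v))
      = ((pvT flat).filter (fun t => decide (pvM flat t = v))).flatMap
        (fun t => PySem.List.sorted (pvGrp flat t) pvItemKey) := by
    intro v
    rw [List.filter_flatMap, ← pv_flatMap_if _ (fun t => decide (pvM flat t = v))
      (fun t => PySem.List.sorted (pvGrp flat t) pvItemKey)]
    simp only [List.flatMap_def]
    apply congrArg List.flatten
    apply List.map_congr_left
    intro t _
    apply pv_filter_all_eq
    intro x hx
    rw [PySem.List.mem_sorted] at hx
    rcases List.mem_filter.mp hx with ⟨_, hxt⟩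
    have hxx : pvTitle x = t := of_decide_eq_true hxt
    rw [hxx]
  simp only [List.flatMap_def]
  apply congrArg List.flatten
  apply List.map_congr_left
  intro v _
  have h2 := hinner v
  simp only [List.flatMap_def] at h2
  exact h2


-- ===== VERDICT (by name: the statement is the Claim_ definition above) =====
theorem sort_and_group_prizes_py_spec : Claim_equal_sort_and_group_prizes_py := by
  intro flat _ _
  unfold Spec_sort_and_group_prizes_py
  rw [pv_A_eq, pv_B_eq]
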